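-- pv_equiv track=rewrite | github.com/thaakir07/obstacleChess | game_validation.py | is_threefold_repetition
-- ===== SOURCE A (Python) =====
-- def is_threefold_repetition(fen_history):
--     # Count occurrences of each FEN position in the history
--     fen_count = {}
--     for fen in fen_history:
--         if fen in fen_count:fen_count[fen] += 1
--         else: fen_count[fen] = 1
--     # Check if any position occurs three or more times
--     for count in fen_count.values():
--         if count >= 3: return True
--     return False
-- ===== SOURCE B (Python) =====
-- def is_threefold_repetition(fen_history):
--     # Sort a copy so equal FENs become adjacent, then run-length scan.
--     prev = None
--     run = 0
--     for fen in sorted(fen_history):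
--         if fen == prev:
--             run += 1
--             if run == 3:
--                 return True
--         else:
--             prev = fen
--             run = 1
--     return False
-- ===== Notes on version B (the rewrite author's own statement) =====
-- stated objective: alternative
-- what changed: Replaces the dict of counts plus a scan of its values by sorting a copy of the history and doing one run-length pass over adjacent equal FENs, returning as soon as a run of 3 appears.
import Mathlib
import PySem

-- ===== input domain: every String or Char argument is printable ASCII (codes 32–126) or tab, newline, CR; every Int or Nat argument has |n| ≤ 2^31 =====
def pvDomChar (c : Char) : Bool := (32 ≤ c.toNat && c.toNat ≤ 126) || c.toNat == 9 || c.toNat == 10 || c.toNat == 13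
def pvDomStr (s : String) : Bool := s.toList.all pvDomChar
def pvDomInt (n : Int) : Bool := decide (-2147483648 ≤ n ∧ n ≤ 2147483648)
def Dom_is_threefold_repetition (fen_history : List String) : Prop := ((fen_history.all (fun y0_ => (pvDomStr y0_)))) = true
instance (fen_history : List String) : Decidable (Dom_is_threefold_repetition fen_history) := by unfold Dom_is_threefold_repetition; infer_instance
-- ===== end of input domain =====

-- B replaces A's dict of counts by sorting a copy and run-length scanning adjacent equal FENs (alternative algorithm, similar cost).
-- ===== PORT A =====
def is_threefold_repetition (fen_history : List String) : Bool :=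
  let fen_count := fen_history.foldl
    (fun d fen => if d.contains fen then d.modify fen 0 (· + 1) else d.insert fen (1 : Int))
    PySem.Dict.empty
  fen_count.values.any (fun count => decide (3 ≤ count))

-- ===== PORT B =====
def runScan3 : Option String → Nat → List String → Bool
  | _, _, [] => false
  | prev, run, fen :: rest =>
    if some fen = prev then
      (if run + 1 = 3 then true else runScan3 prev (run + 1) rest)
    else runScan3 (some fen) 1 rest

def is_threefold_repetition_alt (fen_history : List String) : Bool :=
  runScan3 none 0 (PySem.List.sorted fen_history (fun x => x) false)

-- ===== PRECONDITION & SPEC =====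
def Spec_is_threefold_repetition (fen_history : List String) (out : Bool) : Prop := out = is_threefold_repetition_alt fen_history
instance (fen_history : List String) (out : Bool) : Decidable (Spec_is_threefold_repetition fen_history out) := by unfold Spec_is_threefold_repetition; infer_instance

-- ===== CLAIM (what is proved, stated in full; the proofs are below) =====
def Claim_equal_is_threefold_repetition : Prop := ∀ (fen_history : List String), Dom_is_threefold_repetition fen_history → Spec_is_threefold_repetition fen_history (is_threefold_repetition fen_history)

-- ===== LEMMAS AND PROOFS =====

lemma A_body_eq :
    (fun (d : PySem.Dict String Int) fen =>
      if d.contains fen then d.modify fen 0 (· + 1) else d.insert fen (1 : Int)) =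
    (fun d fen => d.modify fen 0 (· + 1)) := by
  funext d fen
  by_cases h : d.contains fen
  · simp [h]
  · simp only [Bool.not_eq_true] at h
    simp [PySem.Dict.modify, PySem.Dict.getD_of_not_contains, h]

lemma A_char (l : List String) :
    is_threefold_repetition l = true ↔ ∃ x ∈ l, 3 ≤ l.count x := by
  unfold is_threefold_repetition
  rw [A_body_eq, ← PySem.Dict.counter_eq_foldl]
  show (PySem.Dict.counter l).values.any (fun count => decide (3 ≤ count)) = true ↔ _
  have hv : (PySem.Dict.counter l).values = (PySem.Dict.counter l).items.map (·.2) := rfl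
  rw [hv, PySem.Dict.items_counter]
  simp [List.any_eq_true, PySem.Set.mem_ofList]

lemma scan_some (s : List String) : ∀ (p : String) (run : Nat),
    s.Pairwise (· ≤ ·) → (∀ y ∈ s, p ≤ y) → run < 3 →
    (runScan3 (some p) run s = true ↔
      3 ≤ run + s.count p ∨ ∃ x ∈ s, x ≠ p ∧ 3 ≤ s.count x) := by
  induction s with
  | nil => intro p run _ _ hr; simp [runScan3]; omega
  | cons fen rest ih =>
    intro p run hpw hle hr
    obtain ⟨hfle, hpw'⟩ := List.pairwise_cons.mp hpw
    by_cases hfp : fen = p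
    · subst hfp
      by_cases h3 : run + 1 = 3
      · rw [show runScan3 (some fen) run (fen :: rest) = true from by simp [runScan3, h3]]
        simp only [true_iff]
        left
        rw [List.count_cons_self]
        omega
      · rw [show runScan3 (some fen) run (fen :: rest) = runScan3 (some fen) (run + 1) rest from by
              simp [runScan3, h3],
            ih fen (run + 1) hpw' hfle (by omega)]
        constructor
        · rintro (h1 | ⟨x, hx, hxp, hc⟩)
          · left; rw [List.count_cons_self]; omega
          · exact Or.inr ⟨x, List.mem_cons_of_mem _ hx, hxp,
              by rwa [List.count_cons_of_ne (Ne.symm hxp)]⟩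
        · rintro (h1 | ⟨x, hx, hxp, hc⟩)
          · left; rw [List.count_cons_self] at h1; omega
          · rcases List.mem_cons.mp hx with h | h
            · exact absurd h hxp
            · exact Or.inr ⟨x, h, hxp, by rwa [List.count_cons_of_ne (Ne.symm hxp)] at hc⟩
    · have hne : ¬ (some fen = some p) := by simpa using hfp
      rw [show runScan3 (some p) run (fen :: rest) = runScan3 (some fen) 1 rest from by
            simp [runScan3, hne],
          ih fen 1 hpw' hfle (by omega)]
      have hpfen : p ≤ fen := hle fen List.mem_cons_self
      have hpnotin : p ∉ rest := by
        intro hm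
        exact hfp (le_antisymm (hfle p hm) hpfen)
      have hcp : (fen :: rest).count p = 0 := by
        rw [List.count_cons_of_ne hfp, List.count_eq_zero]
        exact hpnotin
      constructor
      · rintro (h1 | ⟨x, hx, hxf, hc⟩)
        · exact Or.inr ⟨fen, List.mem_cons_self, hfp,
            by rw [List.count_cons_self]; omega⟩
        · exact Or.inr ⟨x, List.mem_cons_of_mem _ hx, fun h => hpnotin (h ▸ hx),
            by rwa [List.count_cons_of_ne (Ne.symm hxf)]⟩
      · rintro (h1 | ⟨x, hx, hxp, hc⟩)
        · rw [hcp] at h1; omega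
        · rcases List.mem_cons.mp hx with h | h
          · subst h
            left
            rw [List.count_cons_self] at hc
            omega
          · by_cases hxf : x = fen
            · subst hxf
              left
              rw [List.count_cons_self] at hc
              omega
            · exact Or.inr ⟨x, h, hxf, by rwa [List.count_cons_of_ne (Ne.symm hxf)] at hc⟩

lemma B_char (l : List String) :
    is_threefold_repetition_alt l = true ↔ ∃ x ∈ l, 3 ≤ l.count x := by
  unfold is_threefold_repetition_alt
  have hperm : (PySem.List.sorted l (fun x => x) false).Perm l :=
    PySem.List.sorted_perm l (fun x => x) false
  have hpw : (PySem.List.sorted l (fun x => x) false).Pairwise (· ≤ ·) :=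
    by simpa using PySem.List.sorted_pairwise l (fun x => x)
  have hiff : (∃ x ∈ PySem.List.sorted l (fun x => x) false,
      3 ≤ (PySem.List.sorted l (fun x => x) false).count x) ↔ ∃ x ∈ l, 3 ≤ l.count x := by
    constructor <;> rintro ⟨x, hx, hc⟩
    · exact ⟨x, hperm.mem_iff.mp hx, by rwa [hperm.count_eq] at hc⟩
    · exact ⟨x, hperm.mem_iff.mpr hx, by rwa [hperm.count_eq]⟩
  rw [← hiff]
  cases hs : PySem.List.sorted l (fun x => x) false with
  | nil => simp [runScan3]
  | cons fen rest =>
    rw [hs] at hpw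
    obtain ⟨hfle, hpw'⟩ := List.pairwise_cons.mp hpw
    rw [show runScan3 none 0 (fen :: rest) = runScan3 (some fen) 1 rest from by
          simp [runScan3],
        scan_some rest fen 1 hpw' hfle (by omega)]
    constructor
    · rintro (h1 | ⟨x, hx, hxf, hc⟩)
      · exact ⟨fen, List.mem_cons_self, by rw [List.count_cons_self]; omega⟩
      · exact ⟨x, List.mem_cons_of_mem _ hx, by rwa [List.count_cons_of_ne (Ne.symm hxf)]⟩
    · rintro ⟨x, hx, hc⟩
      by_cases hxf : x = fen
      · subst hxf
        left
        rw [List.count_cons_self] at hc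
        omega
      · rcases List.mem_cons.mp hx with h | h
        · exact absurd h hxf
        · exact Or.inr ⟨x, h, hxf, by rwa [List.count_cons_of_ne (Ne.symm hxf)] at hc⟩

-- ===== VERDICT (by name: the statement is the Claim_ definition above) =====
theorem is_threefold_repetition_spec : Claim_equal_is_threefold_repetition := by
  intro l _
  unfold Spec_is_threefold_repetition
  apply Bool.eq_iff_iff.mpr
  rw [A_char, B_char]
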